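-- pv_equiv track=rewrite | github.com/AshwinManohar1/nursing-be | api/agent/modification_agent/tool_implementation.py | _exceeds_consecutive_days
-- ===== SOURCE A (Python) =====
-- from typing import Any, Dict, Optional, List
--
-- def _exceeds_consecutive_days(assignments: List[str], day_idx: int) -> bool:
--     """Check if staff would work more than 6 consecutive days."""
--     consecutive_count = 0
--     max_consecutive = 0
--
--     for i, shift in enumerate(assignments):
--         if shift not in ["OFF", "PL", "CL", "PREF"]:
--             consecutive_count += 1
--             max_consecutive = max(max_consecutive, consecutive_count)
--         else:
--             consecutive_count = 0
--
--     return max_consecutive > 6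
-- ===== SOURCE B (Python) =====
-- from typing import List
--
-- def _exceeds_consecutive_days(assignments: List[str], day_idx: int) -> bool:
--     """Check if staff would work more than 6 consecutive days."""
--     marker = "".join("O" if shift in ["OFF", "PL", "CL", "PREF"] else "W"
--                      for shift in assignments)
--     return "WWWWWWW" in marker
-- ===== Notes on version B (the rewrite author's own statement) =====
-- stated objective: alternative
-- what changed: Replaces the running-counter/maximum fold with a representation change: map each day to a 'W'/'O' marker character and decide the question by substring search for seven consecutive 'W's.
import Mathlib
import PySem

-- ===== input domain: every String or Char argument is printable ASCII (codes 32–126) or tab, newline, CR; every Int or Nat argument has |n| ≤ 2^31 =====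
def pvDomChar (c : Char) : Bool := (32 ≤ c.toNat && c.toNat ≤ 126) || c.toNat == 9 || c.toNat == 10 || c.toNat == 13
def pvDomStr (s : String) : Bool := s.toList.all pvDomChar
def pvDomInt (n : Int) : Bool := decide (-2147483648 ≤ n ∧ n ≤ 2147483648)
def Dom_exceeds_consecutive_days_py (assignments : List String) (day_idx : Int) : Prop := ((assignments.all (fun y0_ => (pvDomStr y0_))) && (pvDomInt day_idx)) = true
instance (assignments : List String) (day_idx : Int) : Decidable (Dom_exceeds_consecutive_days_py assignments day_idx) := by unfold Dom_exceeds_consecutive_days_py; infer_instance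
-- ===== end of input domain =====

-- B replaces A's running-counter/max fold by a marker string ('W'/'O' per day) and a
-- substring search for "WWWWWWW" (alternative decomposition, same O(n) cost).

-- ===== PORT A =====
-- literal port of A: fold carrying (consecutive_count, max_consecutive), then max_consecutive > 6
def exceeds_consecutive_days_py (assignments : List String) (day_idx : Int) : Bool :=
  let r := assignments.foldl
    (fun (st : Int × Int) shift =>
      if (["OFF", "PL", "CL", "PREF"].contains shift) = false then
        (st.1 + 1, max st.2 (st.1 + 1))
      else
        (0, st.2))
    (0, 0)
  decide (r.2 > 6)

-- ===== PORT B =====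
-- literal port of B: build the marker string, then `"WWWWWWW" in marker` via PySem.Str.isIn
def exceeds_consecutive_days_py_alt (assignments : List String) (day_idx : Int) : Bool :=
  let marker := String.ofList (assignments.map
    (fun shift => if ["OFF", "PL", "CL", "PREF"].contains shift then 'O' else 'W'))
  PySem.Str.isIn "WWWWWWW" marker

-- ===== PRECONDITION & SPEC =====
def Spec_exceeds_consecutive_days_py (assignments : List String) (day_idx : Int) (out : Bool) : Prop := out = exceeds_consecutive_days_py_alt assignments day_idx
instance (assignments : List String) (day_idx : Int) (out : Bool) : Decidable (Spec_exceeds_consecutive_days_py assignments day_idx out) := by unfold Spec_exceeds_consecutive_days_py; infer_instance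

-- ===== CLAIM (what is proved, stated in full; the proofs are below) =====
def Claim_equal_exceeds_consecutive_days_py : Prop := ∀ (assignments : List String) (day_idx : Int), Dom_exceeds_consecutive_days_py assignments day_idx → Spec_exceeds_consecutive_days_py assignments day_idx (exceeds_consecutive_days_py assignments day_idx)

-- ===== LEMMAS AND PROOFS =====

-- work bit of one assignment
def pvWork (s : String) : Bool := !(["OFF", "PL", "CL", "PREF"].contains s)

-- A's fold step, expressed on the work bit
def pvStep (st : Int × Int) (b : Bool) : Int × Int :=
  if b then (st.1 + 1, max st.2 (st.1 + 1)) else (0, st.2)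

-- length of the leading run of `true`s
def pvLead : List Bool → Nat
  | [] => 0
  | true :: bs => pvLead bs + 1
  | false :: _ => 0

theorem pvStepEq (st : Int × Int) (shift : String) :
    (if (["OFF", "PL", "CL", "PREF"].contains shift) = false then
        (st.1 + 1, max st.2 (st.1 + 1))
      else ((0 : Int), st.2)) = pvStep st (pvWork shift) := by
  by_cases h : shift = "OFF" ∨ shift = "PL" ∨ shift = "CL" ∨ shift = "PREF"
  · rcases h with h | h | h | h <;> subst h <;> simp [pvStep, pvWork]
  · push_neg at h
    simp [pvStep, pvWork, h.1, h.2.1, h.2.2.1, h.2.2.2]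

theorem pvDecode_encode (s : String) :
    ((if ["OFF", "PL", "CL", "PREF"].contains s then 'O' else 'W') == 'W') = pvWork s := by
  by_cases h : s = "OFF" ∨ s = "PL" ∨ s = "CL" ∨ s = "PREF"
  · rcases h with h | h | h | h <;> subst h <;> simp [pvWork]
  · push_neg at h
    simp [pvWork, h.1, h.2.1, h.2.2.1, h.2.2.2]

theorem pvEncode_decode (s : String) :
    (if pvWork s then 'W' else 'O')
      = (if ["OFF", "PL", "CL", "PREF"].contains s then 'O' else 'W') := by
  by_cases h : s = "OFF" ∨ s = "PL" ∨ s = "CL" ∨ s = "PREF"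
  · rcases h with h | h | h | h <;> subst h <;> simp [pvWork]
  · push_neg at h
    simp [pvWork, h.1, h.2.1, h.2.2.1, h.2.2.2]

theorem pvPrefix_of_le_lead : ∀ (bs : List Bool) (k : Nat), k ≤ pvLead bs →
    List.replicate k true <+: bs := by
  intro bs
  induction bs with
  | nil => intro k hk; simp [pvLead] at hk; simp [hk]
  | cons b bs ih =>
    intro k hk
    cases b with
    | true =>
      cases k with
      | zero => simp
      | succ k =>
        simp [pvLead] at hk
        rw [List.replicate_succ, List.cons_prefix_cons]
        exact ⟨rfl, ih k (by omega)⟩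
    | false => simp [pvLead] at hk; simp [hk]

theorem pvLead_of_prefix : ∀ (bs : List Bool) (k : Nat),
    List.replicate k true <+: bs → k ≤ pvLead bs := by
  intro bs
  induction bs with
  | nil => intro k hk; rw [List.prefix_nil, List.replicate_eq_nil_iff] at hk; omega
  | cons b bs ih =>
    intro k hk
    cases k with
    | zero => omega
    | succ k =>
      rw [List.replicate_succ, List.cons_prefix_cons] at hk
      obtain ⟨rfl, h2⟩ := hk
      simp [pvLead]
      have := ih k h2
      omega

theorem pvRun_of_lead (bs : List Bool) (h : 7 ≤ pvLead bs) :
    List.replicate 7 true <:+: bs :=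
  (pvPrefix_of_le_lead bs 7 h).isInfix

-- the fold/run characterisation
theorem pvFoldIff : ∀ (bs : List Bool) (c m : Int), 0 ≤ c → c ≤ m →
    ((bs.foldl pvStep (c, m)).2 > 6 ↔
      m > 6 ∨ 7 ≤ c + (pvLead bs : Int) ∨ List.replicate 7 true <:+: bs) := by
  intro bs
  induction bs with
  | nil =>
    intro c m hc hcm
    have hrep : ¬ List.replicate 7 true <:+: ([] : List Bool) := by
      rw [List.infix_nil]; simp [List.replicate]
    simp only [List.foldl_nil, pvLead, Nat.cast_zero, add_zero]
    constructor
    · intro h; left; exact h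
    · rintro (h | h | h)
      · exact h
      · omega
      · exact absurd h hrep
  | cons b bs ih =>
    intro c m hc hcm
    cases b with
    | true =>
      have step : ((true :: bs).foldl pvStep (c, m)) = bs.foldl pvStep (c + 1, max m (c + 1)) := by
        simp [pvStep]
      rw [step, ih (c + 1) (max m (c + 1)) (by omega) (le_max_right _ _)]
      have hcons : List.replicate 7 true <:+: true :: bs ↔
          (6 ≤ pvLead bs ∨ List.replicate 7 true <:+: bs) := by
        rw [List.infix_cons_iff]
        constructor
        · rintro (h | h)
          · left
            rw [show (7 : Nat) = 6 + 1 by rfl, List.replicate_succ, List.cons_prefix_cons] at h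
            exact pvLead_of_prefix bs 6 h.2
          · right; exact h
        · rintro (h | h)
          · left
            rw [show (7 : Nat) = 6 + 1 by rfl, List.replicate_succ, List.cons_prefix_cons]
            exact ⟨rfl, pvPrefix_of_le_lead bs 6 h⟩
          · right; exact h
      rw [hcons]
      simp only [pvLead]
      constructor
      · rintro (h | h | h)
        · rcases lt_or_ge 6 m with hm | hm
          · left; omega
          · right; left; push_cast; omega
        · right; left; push_cast at h ⊢; omega
        · right; right; right; exact h
      · rintro (h | h | h | h)
        · left; omega
        · right; left; push_cast at h ⊢; omega
        · right; left; push_cast; omega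
        · right; right; exact h
    | false =>
      have step : ((false :: bs).foldl pvStep (c, m)) = bs.foldl pvStep (0, m) := by
        simp [pvStep]
      rw [step, ih 0 m le_rfl (by omega)]
      have hcons : List.replicate 7 true <:+: false :: bs ↔ List.replicate 7 true <:+: bs := by
        rw [List.infix_cons_iff]
        constructor
        · rintro (h | h)
          · exfalso
            rw [show (7 : Nat) = 6 + 1 by rfl, List.replicate_succ, List.cons_prefix_cons] at h
            exact Bool.true_eq_false.mp h.1
          · exact h
        · intro h; right; exact h
      rw [hcons]
      simp only [pvLead, Nat.cast_zero, add_zero, zero_add]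
      constructor
      · rintro (h | h | h)
        · left; omega
        · right; right
          exact pvRun_of_lead bs (by exact_mod_cast h)
        · right; right; exact h
      · rintro (h | h | h)
        · left; omega
        · left; omega
        · right; right; exact h

theorem pvInfixIff (assignments : List String) :
    (List.replicate 7 'W' <:+: assignments.map
        (fun shift => if ["OFF", "PL", "CL", "PREF"].contains shift then 'O' else 'W'))
      ↔ List.replicate 7 true <:+: assignments.map pvWork := by
  have hmap1 : (assignments.map
      (fun shift => if ["OFF", "PL", "CL", "PREF"].contains shift then 'O' else 'W')).map
        (fun c => c == 'W') = assignments.map pvWork := by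
    rw [List.map_map]
    exact List.map_congr_left (fun s _ => pvDecode_encode s)
  have hmap2 : (assignments.map pvWork).map (fun b => if b then 'W' else 'O')
      = assignments.map
        (fun shift => if ["OFF", "PL", "CL", "PREF"].contains shift then 'O' else 'W') := by
    rw [List.map_map]
    exact List.map_congr_left (fun s _ => pvEncode_decode s)
  constructor
  · intro h
    have h2 := h.map (fun c => c == 'W')
    rw [hmap1, List.map_replicate] at h2
    simpa using h2
  · intro h
    have h2 := h.map (fun b => if b then 'W' else 'O')
    rw [hmap2, List.map_replicate] at h2
    simpa using h2

theorem pvAltIff (assignments : List String) (day_idx : Int) :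
    exceeds_consecutive_days_py_alt assignments day_idx = true
      ↔ List.replicate 7 true <:+: assignments.map pvWork := by
  simp only [exceeds_consecutive_days_py_alt]
  rw [PySem.Str.isIn_iff_infix, String.toList_ofList, String.toList_ofList,
    show (['W', 'W', 'W', 'W', 'W', 'W', 'W'] : List Char) = List.replicate 7 'W' from rfl]
  exact pvInfixIff assignments

theorem pvAEq (assignments : List String) (day_idx : Int) :
    exceeds_consecutive_days_py assignments day_idx
      = decide (((assignments.map pvWork).foldl pvStep (0, 0)).2 > 6) := by
  simp only [exceeds_consecutive_days_py, List.foldl_map, pvStepEq]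

-- ===== VERDICT (by name: the statement is the Claim_ definition above) =====
theorem exceeds_consecutive_days_py_spec : Claim_equal_exceeds_consecutive_days_py := by
  intro assignments day_idx _
  unfold Spec_exceeds_consecutive_days_py
  by_cases hb : exceeds_consecutive_days_py_alt assignments day_idx = true
  · rw [hb, pvAEq, decide_eq_true_iff,
      pvFoldIff (assignments.map pvWork) 0 0 le_rfl le_rfl]
    right; right
    exact (pvAltIff assignments day_idx).mp hb
  · have hb' : exceeds_consecutive_days_py_alt assignments day_idx = false := by
      revert hb; cases exceeds_consecutive_days_py_alt assignments day_idx <;> simp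
    have hnot : ¬ List.replicate 7 true <:+: assignments.map pvWork := by
      intro h; exact hb ((pvAltIff assignments day_idx).mpr h)
    rw [hb', pvAEq, decide_eq_false_iff_not,
      pvFoldIff (assignments.map pvWork) 0 0 le_rfl le_rfl]
    rintro (h | h | h)
    · omega
    · exact hnot (pvRun_of_lead _ (by exact_mod_cast (by omega : (7 : Int) ≤ (pvLead (assignments.map pvWork) : Int))))
    · exact hnot h
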